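-- pv_equiv track=rewrite | github.com/daniel880423/Member_System | file/hw2/1100345/s1100345_0.py | homework_2
-- ===== SOURCE A (Python) =====
-- def homework_2(lst): # 請同學記得把檔案名稱改成自己的學號(ex.1104813.py)
--     count_step = 0
--     long = len(lst)
--     for i in range(long):
--         if (lst[i] % 2 != 0):
--             lst[i] += 1
--             count_step += 1
--
--     for i in range(1,long):
--         while(lst[i]<=lst[i-1]):
--             lst[i] = lst[i]+2
--             count_step += 2
--             if lst[i]>lst[i-1]:
--                 break
--
--     return  count_step
-- ===== SOURCE B (Python) =====
-- def homework_2(lst):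
--     # one pass: round odds up, then jump straight to prev+2 with a closed-form
--     # step count instead of repeated +2 increments
--     count = 0
--     prev = None
--     for i in range(len(lst)):
--         x = lst[i]
--         if x % 2 != 0:
--             x += 1
--             count += 1
--         if prev is not None and x <= prev:
--             count += prev - x + 2
--             x = prev + 2
--         lst[i] = x
--         prev = x
--     return count
-- ===== Notes on version B (the rewrite author's own statement) =====
-- stated objective: faster
-- what changed: Replaced A's two passes with a repeated +2 while-loop by a single pass that computes the bump steps in closed form (prev - x + 2) and jumps directly to prev + 2.
import Mathlib
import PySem

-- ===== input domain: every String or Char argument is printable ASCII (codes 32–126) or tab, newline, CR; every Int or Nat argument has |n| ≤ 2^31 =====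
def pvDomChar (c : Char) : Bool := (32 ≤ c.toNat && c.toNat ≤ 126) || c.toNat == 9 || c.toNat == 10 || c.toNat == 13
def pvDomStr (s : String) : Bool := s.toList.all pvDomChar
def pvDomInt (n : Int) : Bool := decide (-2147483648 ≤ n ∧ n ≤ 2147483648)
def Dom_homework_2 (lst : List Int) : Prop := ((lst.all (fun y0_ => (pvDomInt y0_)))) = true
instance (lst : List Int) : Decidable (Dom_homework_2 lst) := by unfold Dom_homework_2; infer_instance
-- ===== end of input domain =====

-- B replaces A's repeated +2 while-loop by a single pass with a closed-form step count; faster when value gaps are large. Both mutate lst identically in Python.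


-- ===== PORT A =====
-- first loop: round each odd element up, counting one step per rounding
def roundLoopA : List Int → List Int × Int
  | [] => ([], 0)
  | x :: xs =>
    let (ys, c) := roundLoopA xs
    if x % 2 ≠ 0 then ((x + 1) :: ys, c + 1) else (x :: ys, c)

-- the inner while: lst[i] += 2 (count += 2) while lst[i] <= lst[i-1]
def whileLoopA (prev cur cnt : Int) : Int × Int :=
  if h : cur ≤ prev then whileLoopA prev (cur + 2) (cnt + 2) else (cur, cnt)
termination_by (prev + 2 - cur).toNat
decreasing_by omega

-- second loop over i in range(1, long), carrying the (mutated) previous element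
def fixLoopA (prev : Int) : List Int → Int
  | [] => 0
  | x :: xs =>
    let (x', c) := whileLoopA prev x 0
    c + fixLoopA x' xs

def homework_2 (lst : List Int) : Int :=
  let (ys, c) := roundLoopA lst
  match ys with
  | [] => c
  | y :: rest => c + fixLoopA y rest

-- ===== PORT B =====
-- one pass, carrying the previous final value (none before the first element)
def altLoopB : Option Int → Int → List Int → Int
  | _, cnt, [] => cnt
  | prev, cnt, x :: xs =>
    let (y, cnt') := if x % 2 ≠ 0 then (x + 1, cnt + 1) else (x, cnt)
    match prev with
    | none => altLoopB (some y) cnt' xs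
    | some p =>
      if y ≤ p then altLoopB (some (p + 2)) (cnt' + (p - y + 2)) xs
      else altLoopB (some y) cnt' xs

def homework_2_alt (lst : List Int) : Int := altLoopB none 0 lst

-- ===== PRECONDITION & SPEC =====
def Spec_homework_2 (lst : List Int) (out : Int) : Prop := out = homework_2_alt lst
instance (lst : List Int) (out : Int) : Decidable (Spec_homework_2 lst out) := by unfold Spec_homework_2; infer_instance

-- ===== CLAIM (what is proved, stated in full; the proofs are below) =====
def Claim_equal_homework_2 : Prop := ∀ (lst : List Int), Dom_homework_2 lst → Spec_homework_2 lst (homework_2 lst)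

-- ===== LEMMAS AND PROOFS =====
def rnd (x : Int) : Int := if x % 2 ≠ 0 then x + 1 else x
def oddI (x : Int) : Int := if x % 2 ≠ 0 then 1 else 0
def oddCount (xs : List Int) : Int := ((xs.filter (fun x => x % 2 ≠ 0)).length : Int)

theorem rnd_even (x : Int) : rnd x % 2 = 0 := by
  unfold rnd; split_ifs with h <;> omega

theorem oddCount_cons (x : Int) (xs : List Int) :
    oddCount (x :: xs) = oddI x + oddCount xs := by
  simp only [oddCount, oddI, List.filter_cons]
  by_cases hx : x % 2 ≠ 0 <;> simp [hx] <;> ring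

theorem roundLoopA_eq (xs : List Int) :
    roundLoopA xs = (xs.map rnd, oddCount xs) := by
  induction xs with
  | nil => simp [roundLoopA, oddCount]
  | cons x xs ih =>
    simp only [roundLoopA, ih, List.map_cons, oddCount_cons, rnd, oddI]
    by_cases hx : x % 2 ≠ 0 <;> simp [hx] <;> ring

theorem whileLoopA_eq (prev cur cnt : Int) (hp : prev % 2 = 0) (hc : cur % 2 = 0) :
    whileLoopA prev cur cnt =
      if cur ≤ prev then (prev + 2, cnt + (prev - cur + 2)) else (cur, cnt) := by
  by_cases h : cur ≤ prev
  · rw [whileLoopA]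
    simp only [h, dif_pos, if_pos]
    rw [whileLoopA_eq prev (cur + 2) (cnt + 2) hp (by omega)]
    split_ifs with h2 <;> simp only [Prod.mk.injEq, true_and] <;> omega
  · rw [whileLoopA]; simp [h]
termination_by (prev + 2 - cur).toNat
decreasing_by omega

theorem fixLoopA_cons (prev y : Int) (ys : List Int) (hp : prev % 2 = 0) (hy : y % 2 = 0) :
    fixLoopA prev (y :: ys) =
      if y ≤ prev then (prev - y + 2) + fixLoopA (prev + 2) ys
      else fixLoopA y ys := by
  simp only [fixLoopA, whileLoopA_eq prev y 0 hp hy]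
  split_ifs <;> simp

theorem altLoopB_cons (prev cnt x : Int) (xs : List Int) :
    altLoopB (some prev) cnt (x :: xs) =
      if rnd x ≤ prev then altLoopB (some (prev + 2)) ((cnt + oddI x) + (prev - rnd x + 2)) xs
      else altLoopB (some (rnd x)) (cnt + oddI x) xs := by
  simp only [altLoopB, rnd, oddI]
  by_cases hx : x % 2 ≠ 0 <;> simp [hx]

theorem altLoopB_none_cons (cnt x : Int) (xs : List Int) :
    altLoopB none cnt (x :: xs) = altLoopB (some (rnd x)) (cnt + oddI x) xs := by
  simp only [altLoopB, rnd, oddI]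
  by_cases hx : x % 2 ≠ 0 <;> simp [hx]

theorem main_lemma (xs : List Int) (prev cnt : Int) (hp : prev % 2 = 0) :
    altLoopB (some prev) cnt xs = cnt + oddCount xs + fixLoopA prev (xs.map rnd) := by
  induction xs generalizing prev cnt with
  | nil => simp [altLoopB, fixLoopA, oddCount]
  | cons x xs ih =>
    have hev := rnd_even x
    rw [altLoopB_cons, List.map_cons, fixLoopA_cons prev (rnd x) _ hp hev, oddCount_cons]
    by_cases h2 : rnd x ≤ prev
    · rw [if_pos h2, if_pos h2, ih _ _ (by omega)]; ring
    · rw [if_neg h2, if_neg h2, ih _ _ hev]; ring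

theorem homework_2_spec_aux (lst : List Int) : homework_2 lst = homework_2_alt lst := by
  cases lst with
  | nil => simp [homework_2, homework_2_alt, roundLoopA, altLoopB]
  | cons x xs =>
    simp only [homework_2, homework_2_alt, roundLoopA_eq, List.map_cons, oddCount_cons,
      altLoopB_none_cons, main_lemma xs (rnd x) _ (rnd_even x)]
    ring

-- ===== VERDICT (by name: the statement is the Claim_ definition above) =====
theorem homework_2_spec : Claim_equal_homework_2 := by
  intro lst _
  unfold Spec_homework_2
  exact homework_2_spec_aux lst
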